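-- pv_equiv track=rewrite | github.com/minseokpark6/Problem_Solving | 프로그래머스/1/340198. ［PCCE 기출문제］ 10번 ／ 공원/［PCCE 기출문제］ 10번 ／ 공원.py | solution
-- ===== SOURCE A (Python) =====
-- def solution(mats, park):
--     # 공원의 넓이 정의
--     W, H = len(park[0]), len(park)
--     # 주어진 돗자리 중 가장 큰 돗자리부터 탐색
--     mats.sort(reverse=True)
--
--     # 특정 위치에 돗자리를 놓을 수 있는지 확인하는 함수 정의
--     def can_place(h, w, m):
--         if h+m > H or w+m > W:
--             return False
--         return all(park[i][j] == "-1" for i in range(h, h+m) for j in range(w, w+m))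
--
--     '''
--     all 함수는 범위 안에 모든 조건이 참일 때만, True를 반환
--     이 중 하나라도 조건에 해당하지 않으면 False를 반환
--     '''
--
--     # 가장 큰 돗자리부터 확인
--     for mat in mats:
--         for i in range(H-mat+1):
--             for j in range(W-mat+1):
--                 if can_place(i, j, mat):
--                     # 출력
--                     return mat
--
--     # 돗자리가 위치할 수 없는 경우 출력
--     return -1
-- ===== SOURCE B (Python) =====
-- def solution(mats, park):
--     # One O(H*W) dynamic-programming pass computes the largest all-empty square side;
--     # then a single filter/max pass over mats picks the answer (A re-scans the park per mat).
--     # Return-value equivalence only: A sorts `mats` in place, B does not mutate it.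
--     H, W = len(park), len(park[0])
--     side = 0
--     prev = [0] * W          # prev[j]: largest empty square ending at (i-1, j)
--     for i in range(H):
--         cur = []
--         for j in range(W):
--             if park[i][j] == "-1":
--                 if j == 0:
--                     v = 1
--                 else:
--                     v = min(prev[j], cur[j - 1], prev[j - 1]) + 1
--             else:
--                 v = 0
--             cur.append(v)
--             if v > side:
--                 side = v
--         prev = cur
--     cand = [m for m in mats if m <= side]
--     return max(cand) if cand else -1
-- ===== Notes on version B (the rewrite author's own statement) =====
-- stated objective: faster
-- what changed: B replaces A's per-mat brute-force park scan by a single O(H*W) dynamic-programming pass that computes the largest all-empty square side, then picks the answer in one filter/max pass over mats; B also does not mutate mats (A sorts it in place).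
-- outside the precondition, e.g. on solution([], [['x'], []]): A returns -1, B raises IndexError; on solution([0], [['-1'], []]): A returns 0, B raises IndexError
import Mathlib
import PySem

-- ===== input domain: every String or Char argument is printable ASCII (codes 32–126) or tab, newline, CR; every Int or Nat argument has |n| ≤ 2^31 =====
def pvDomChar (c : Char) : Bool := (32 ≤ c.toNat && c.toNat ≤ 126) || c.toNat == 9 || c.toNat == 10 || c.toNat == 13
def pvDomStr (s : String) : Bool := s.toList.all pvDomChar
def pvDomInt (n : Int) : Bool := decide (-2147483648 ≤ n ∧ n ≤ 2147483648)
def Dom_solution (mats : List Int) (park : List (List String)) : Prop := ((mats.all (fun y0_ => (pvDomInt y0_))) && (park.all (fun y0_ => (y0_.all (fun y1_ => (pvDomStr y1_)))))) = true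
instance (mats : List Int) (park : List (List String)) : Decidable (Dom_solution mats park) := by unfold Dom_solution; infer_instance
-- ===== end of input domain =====

-- B computes the park's largest all-empty square side once with a single O(H·W) dynamic-programming
-- pass and then picks the best mat in one filter/max pass over mats, instead of A's full park
-- re-scan for every mat in the sorted list; return-value equivalence only (A sorts `mats` in
-- place, B does not mutate it).

-- ===== PORT A =====
-- A's `park[i][j] == "-1"` (default "" is never read under Pre_)
def pvCellA (park : List (List String)) (i j : Int) : Bool :=
  ((PySem.List.pyGet? ((PySem.List.pyGet? park i).getD []) j).getD "") == "-1"

-- A's `can_place(h, w, m)`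
def pvCanPlace (park : List (List String)) (H W h w m : Int) : Bool :=
  if h + m > H || w + m > W then false
  else
    (PySem.List.pyRange h (h + m) 1).all fun i =>
      (PySem.List.pyRange w (w + m) 1).all fun j => pvCellA park i j

-- A's inner `for j in range(W-mat+1)` loop with early `return mat` (recursive so that the
-- loop stops at the first hit, like Python's lazy range; exact)
def pvColLoopA (park : List (List String)) (H W i mat jstop j : Int) : Bool :=
  if h : j < jstop then pvCanPlace park H W i j mat || pvColLoopA park H W i mat jstop (j + 1)
  else false
termination_by (jstop - j).toNat
decreasing_by omega

-- A's outer `for i in range(H-mat+1)` loop, same shape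
def pvRowLoopA (park : List (List String)) (H W mat istop i : Int) : Bool :=
  if h : i < istop then pvColLoopA park H W i mat (W - mat + 1) 0 || pvRowLoopA park H W mat istop (i + 1)
  else false
termination_by (istop - i).toNat
decreasing_by omega

-- A's two position loops for one mat: true iff some position admits `can_place`
def pvAnyPlace (park : List (List String)) (H W mat : Int) : Bool :=
  pvRowLoopA park H W mat (H - mat + 1) 0

-- A's outer loop over the descending-sorted mats, `return mat` on the first fit, else -1
def pvLoopA (park : List (List String)) (H W : Int) : List Int → Int
  | [] => -1
  | mat :: rest => if pvAnyPlace park H W mat then mat else pvLoopA park H W rest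

def solution (mats : List Int) (park : List (List String)) : Int :=
  let W : Int := ((PySem.List.pyGet? park 0).getD []).length
  let H : Int := park.length
  pvLoopA park H W (PySem.List.sorted mats (fun x => x) true)

-- ===== PORT B =====
-- B's `park[i][j] == "-1"` (default "" is never read under Pre_)
def pvCellB (park : List (List String)) (i j : Int) : Bool :=
  ((PySem.List.pyGet? ((PySem.List.pyGet? park i).getD []) j).getD "") == "-1"

-- B's inner loop body: compute v, append it to cur, update the running side
def pvInnerB (park : List (List String)) (prev : List Int) (i : Int)
    (sc : Int × List Int) (j : Int) : Int × List Int :=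
  let v : Int :=
    if pvCellB park i j then
      (if j == 0 then 1
       else min (min (PySem.List.pyGetD prev j 0) (PySem.List.pyGetD sc.2 (j - 1) 0))
            (PySem.List.pyGetD prev (j - 1) 0) + 1)
    else 0
  (if sc.1 < v then v else sc.1, sc.2 ++ [v])

-- B's `for j in range(W)` loop for one row (state: running side, cur; prev is the last row)
def pvRowB (park : List (List String)) (W : Int) (sp : Int × List Int) (i : Int) : Int × List Int :=
  (PySem.List.pyRange 0 W 1).foldl (pvInnerB park sp.2 i) (sp.1, [])

def solution_alt (mats : List Int) (park : List (List String)) : Int :=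
  let H : Int := park.length
  let W : Int := ((PySem.List.pyGet? park 0).getD []).length
  let sp := (PySem.List.pyRange 0 H 1).foldl (pvRowB park W) (0, List.replicate W.toNat 0)
  let cand := mats.filter (fun m => decide (m ≤ sp.1))
  (PySem.List.max? cand (fun x => x)).getD (-1)

-- ===== PRECONDITION & SPEC =====
-- Pre_ excludes the empty park (A raises IndexError on park[0]) and parks with a row shorter
-- than the first row (A indexes past such a row and raises IndexError on most inputs; where A
-- happens to return before reaching the short row, B's full DP pass still reaches it and
-- raises, so those inputs are excluded too).
def Pre_solution (mats : List Int) (park : List (List String)) : Prop :=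
  park ≠ [] ∧ ∀ r ∈ park, (park.headD []).length ≤ r.length
instance (mats : List Int) (park : List (List String)) : Decidable (Pre_solution mats park) := by
  unfold Pre_solution; infer_instance

def pvWitness_solution : List Int × List (List String) := ([1], [["-1"]])

def Spec_solution (mats : List Int) (park : List (List String)) (out : Int) : Prop := out = solution_alt mats park
instance (mats : List Int) (park : List (List String)) (out : Int) : Decidable (Spec_solution mats park out) := by unfold Spec_solution; infer_instance

-- ===== CLAIM (what is proved, stated in full; the proofs are below) =====
def Claim_equal_solution : Prop := ∀ (mats : List Int) (park : List (List String)), Dom_solution mats park → Pre_solution mats park → Spec_solution mats park (solution mats park)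

-- ===== LEMMAS AND PROOFS =====

-- an all-empty m×m block of the park sits at (i, j) inside the H×W frame
def pvFitsProp (park : List (List String)) (H W m : Int) : Prop :=
  ∃ i j, 0 ≤ i ∧ 0 ≤ j ∧ i + m ≤ H ∧ j + m ≤ W ∧
    ∀ x y, i ≤ x → x < i + m → j ≤ y → y < j + m → pvCellA park x y = true

theorem pvCanPlace_iff (park : List (List String)) (H W h w m : Int) :
    pvCanPlace park H W h w m = true ↔
      h + m ≤ H ∧ w + m ≤ W ∧
        ∀ x y, h ≤ x → x < h + m → w ≤ y → y < w + m → pvCellA park x y = true := by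
  unfold pvCanPlace
  split
  · next hg =>
    simp only [Bool.or_eq_true, decide_eq_true_eq] at hg
    constructor
    · intro h; exact absurd h (by simp)
    · rintro ⟨h1, h2, -⟩; omega
  · next hg =>
    simp only [Bool.or_eq_true, decide_eq_true_eq, not_or, not_lt] at hg
    simp only [List.all_eq_true, PySem.List.mem_pyRange_one]
    constructor
    · intro hall
      exact ⟨hg.1, hg.2, fun x y hx1 hx2 hy1 hy2 => hall x ⟨hx1, hx2⟩ y ⟨hy1, hy2⟩⟩
    · rintro ⟨-, -, hall⟩ x ⟨hx1, hx2⟩ y ⟨hy1, hy2⟩; exact hall x y hx1 hx2 hy1 hy2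

theorem pvColLoopA_eq (park : List (List String)) (H W i mat jstop : Int) (j : Int) :
    pvColLoopA park H W i mat jstop j =
      (PySem.List.pyRange j jstop 1).any (fun jj => pvCanPlace park H W i jj mat) := by
  have key : ∀ n : Nat, ∀ j : Int, (jstop - j).toNat ≤ n → pvColLoopA park H W i mat jstop j =
      (PySem.List.pyRange j jstop 1).any (fun jj => pvCanPlace park H W i jj mat) := by
    intro n
    induction n with
    | zero =>
      intro j hle
      rw [pvColLoopA, dif_neg (by omega : ¬ j < jstop),
        PySem.List.pyRange_one_eq_nil (by omega)]
      rfl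
    | succ k ih =>
      intro j hle
      rw [pvColLoopA]
      by_cases hj : j < jstop
      · rw [dif_pos hj, PySem.List.pyRange_one_cons hj, List.any_cons, ih (j + 1) (by omega)]
      · rw [dif_neg hj, PySem.List.pyRange_one_eq_nil (by omega)]
        rfl
  exact key (jstop - j).toNat j le_rfl

theorem pvRowLoopA_eq (park : List (List String)) (H W mat istop : Int) (i : Int) :
    pvRowLoopA park H W mat istop i =
      (PySem.List.pyRange i istop 1).any
        (fun ii => (PySem.List.pyRange 0 (W - mat + 1) 1).any
          (fun jj => pvCanPlace park H W ii jj mat)) := by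
  have key : ∀ n : Nat, ∀ i : Int, (istop - i).toNat ≤ n → pvRowLoopA park H W mat istop i =
      (PySem.List.pyRange i istop 1).any
        (fun ii => (PySem.List.pyRange 0 (W - mat + 1) 1).any
          (fun jj => pvCanPlace park H W ii jj mat)) := by
    intro n
    induction n with
    | zero =>
      intro i hle
      rw [pvRowLoopA, dif_neg (by omega : ¬ i < istop),
        PySem.List.pyRange_one_eq_nil (by omega)]
      rfl
    | succ k ih =>
      intro i hle
      rw [pvRowLoopA]
      by_cases hi : i < istop
      · rw [dif_pos hi, PySem.List.pyRange_one_cons hi, List.any_cons, ih (i + 1) (by omega),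
          pvColLoopA_eq]
      · rw [dif_neg hi, PySem.List.pyRange_one_eq_nil (by omega)]
        rfl
  exact key (istop - i).toNat i le_rfl

theorem pvAnyPlace_iff (park : List (List String)) (H W mat : Int) :
    pvAnyPlace park H W mat = true ↔ pvFitsProp park H W mat := by
  unfold pvAnyPlace
  rw [pvRowLoopA_eq]
  simp only [List.any_eq_true, PySem.List.mem_pyRange_one]
  constructor
  · rintro ⟨i, ⟨hi0, hiH⟩, j, ⟨hj0, hjW⟩, hcp⟩
    rcases (pvCanPlace_iff park H W i j mat).1 hcp with ⟨h1, h2, hall⟩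
    exact ⟨i, j, hi0, hj0, h1, h2, hall⟩
  · rintro ⟨i, j, hi0, hj0, h1, h2, hall⟩
    exact ⟨i, ⟨hi0, by omega⟩, j, ⟨hj0, by omega⟩,
      (pvCanPlace_iff park H W i j mat).2 ⟨h1, h2, hall⟩⟩

theorem pvFitsProp_nonpos (park : List (List String)) (H W m : Int)
    (hH : 0 ≤ H) (hW : 0 ≤ W) (hm : m ≤ 0) : pvFitsProp park H W m := by
  exact ⟨0, 0, le_refl 0, le_refl 0, by omega, by omega,
    fun x y a b c d => absurd b (by omega)⟩

-- ---- the DP invariant: pvSq is "the k×k square with bottom-right corner (i, j) is all empty",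
-- pvDpOK says v is the LARGEST such k within the top-left (i+1)×(j+1) corner of the grid ----

def pvSq (park : List (List String)) (i j k : Int) : Prop :=
  ∀ x y : Int, i - k < x → x ≤ i → j - k < y → y ≤ j → pvCellB park x y = true

def pvDpOK (park : List (List String)) (i j v : Int) : Prop :=
  0 ≤ v ∧ v ≤ i + 1 ∧ v ≤ j + 1 ∧ pvSq park i j v ∧
    ∀ k : Int, k ≤ i + 1 → k ≤ j + 1 → pvSq park i j k → k ≤ v

theorem pvSq_mono (park : List (List String)) (i j k k' : Int) (h : k' ≤ k)
    (hs : pvSq park i j k) : pvSq park i j k' :=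
  fun x y hx1 hx2 hy1 hy2 => hs x y (by omega) hx2 (by omega) hy2

theorem pvDpOK_base (park : List (List String)) (j : Int) (hj : -1 ≤ j) :
    pvDpOK park (-1) j 0 := by
  refine ⟨le_refl 0, by omega, by omega, fun x y hx1 hx2 hy1 hy2 => absurd hx2 (by omega),
    fun k hk1 hk2 hks => by omega⟩

theorem pvDp_blocked (park : List (List String)) (i j : Int) (hi : 0 ≤ i) (hj : 0 ≤ j)
    (hc : pvCellB park i j = false) : pvDpOK park i j 0 := by
  refine ⟨le_refl 0, by omega, by omega, fun x y hx1 hx2 hy1 hy2 => absurd hx2 (by omega), ?_⟩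
  intro k hk1 hk2 hks
  by_contra hlt
  have := hks i j (by omega) le_rfl (by omega) le_rfl
  rw [hc] at this
  cases this

theorem pvDp_first (park : List (List String)) (i : Int) (hi : 0 ≤ i)
    (hc : pvCellB park i 0 = true) : pvDpOK park i 0 1 := by
  refine ⟨by omega, by omega, by omega, ?_, fun k hk1 hk2 hks => by omega⟩
  intro x y hx1 hx2 hy1 hy2
  have hx : x = i := by omega
  have hy : y = 0 := by omega
  rw [hx, hy]; exact hc

theorem pvDp_step (park : List (List String)) (i j a b c : Int) (hi : 0 ≤ i) (hj : 0 < j)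
    (hc : pvCellB park i j = true)
    (ha : pvDpOK park (i - 1) j a) (hb : pvDpOK park i (j - 1) b)
    (hcc : pvDpOK park (i - 1) (j - 1) c) :
    pvDpOK park i j (min (min a b) c + 1) := by
  obtain ⟨ha0, hai, haj, haS, haM⟩ := ha
  obtain ⟨hb0, hbi, hbj, hbS, hbM⟩ := hb
  obtain ⟨hc0, hci, hcj, hcS, hcM⟩ := hcc
  set t : Int := min (min a b) c + 1 with ht
  have ht1 : 1 ≤ t := by omega
  refine ⟨by omega, by omega, by omega, ?_, ?_⟩
  · -- pvSq park i j t
    intro x y hx1 hx2 hy1 hy2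
    by_cases hx : x = i
    · by_cases hy : y = j
      · rw [hx, hy]; exact hc
      · exact pvSq_mono park i (j - 1) b (t - 1) (by omega) hbS x y (by omega) (by omega)
          (by omega) (by omega)
    · by_cases hy : y = j
      · exact pvSq_mono park (i - 1) j a (t - 1) (by omega) haS x y (by omega) (by omega)
          (by omega) (by omega)
      · exact pvSq_mono park (i - 1) (j - 1) c (t - 1) (by omega) hcS x y (by omega) (by omega)
          (by omega) (by omega)
  · -- maximality
    intro k hk1 hk2 hks
    by_cases hk : k ≤ 0
    · omega
    · have h1 : k - 1 ≤ a := haM (k - 1) (by omega) (by omega)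
        (fun x y c1 c2 c3 c4 => hks x y (by omega) (by omega) (by omega) (by omega))
      have h2 : k - 1 ≤ b := hbM (k - 1) (by omega) (by omega)
        (fun x y c1 c2 c3 c4 => hks x y (by omega) (by omega) (by omega) (by omega))
      have h3 : k - 1 ≤ c := hcM (k - 1) (by omega) (by omega)
        (fun x y c1 c2 c3 c4 => hks x y (by omega) (by omega) (by omega) (by omega))
      omega

-- B's inner fold over one row: every produced entry is the DP value, the running side is an
-- upper bound of all entries and is either the old side or one of them
theorem pvRowB_inner_spec (park : List (List String)) (W : Int) (i : Int) (s0 : Int)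
    (prev : List Int) (hi : 0 ≤ i)
    (hprev : ∀ j : Int, 0 ≤ j → j < W → pvDpOK park (i - 1) j (PySem.List.pyGetD prev j 0)) :
    ∀ n : Nat, (n : Int) ≤ W →
      ((PySem.List.pyRange 0 (n : Int) 1).foldl (pvInnerB park prev i) (s0, [])).2.length = n ∧
      (∀ j : Nat, j < n →
        pvDpOK park i (j : Int)
          (PySem.List.pyGetD ((PySem.List.pyRange 0 (n : Int) 1).foldl (pvInnerB park prev i) (s0, [])).2 (j : Int) 0)) ∧
      s0 ≤ ((PySem.List.pyRange 0 (n : Int) 1).foldl (pvInnerB park prev i) (s0, [])).1 ∧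
      (∀ j : Nat, j < n →
        PySem.List.pyGetD ((PySem.List.pyRange 0 (n : Int) 1).foldl (pvInnerB park prev i) (s0, [])).2 (j : Int) 0 ≤
          ((PySem.List.pyRange 0 (n : Int) 1).foldl (pvInnerB park prev i) (s0, [])).1) ∧
      (((PySem.List.pyRange 0 (n : Int) 1).foldl (pvInnerB park prev i) (s0, [])).1 = s0 ∨
        ∃ j : Nat, j < n ∧
          ((PySem.List.pyRange 0 (n : Int) 1).foldl (pvInnerB park prev i) (s0, [])).1 =
            PySem.List.pyGetD ((PySem.List.pyRange 0 (n : Int) 1).foldl (pvInnerB park prev i) (s0, [])).2 (j : Int) 0) := by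
  intro n
  induction n with
  | zero =>
    intro hle
    rw [Nat.cast_zero, PySem.List.pyRange_one_eq_nil (le_refl 0)]
    exact ⟨rfl, fun j hj => absurd hj (Nat.not_lt_zero j), le_rfl,
      fun j hj => absurd hj (Nat.not_lt_zero j), Or.inl rfl⟩
  | succ n ih =>
    intro hle
    obtain ⟨ihlen, ihdp, ihs0, ihub, ihwit⟩ := ih (by omega)
    have hcast : ((n + 1 : Nat) : Int) = (n : Int) + 1 := by push_cast; ring
    rw [hcast, PySem.List.pyRange_one_succ_right (by positivity), List.foldl_append,
      List.foldl_cons, List.foldl_nil]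
    set p := (PySem.List.pyRange 0 (n : Int) 1).foldl (pvInnerB park prev i) (s0, []) with hp
    set v : Int :=
      (if pvCellB park i (n : Int) then
        (if ((n : Int) == 0) then 1
         else min (min (PySem.List.pyGetD prev (n : Int) 0) (PySem.List.pyGetD p.2 ((n : Int) - 1) 0))
              (PySem.List.pyGetD prev ((n : Int) - 1) 0) + 1)
      else 0) with hv
    have hstep : pvInnerB park prev i p (n : Int) = (if p.1 < v then v else p.1, p.2 ++ [v]) := rfl
    rw [hstep]
    -- the freshly computed entry is the DP value
    have hvdp : pvDpOK park i (n : Int) v := by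
      by_cases hcell : pvCellB park i (n : Int) = true
      · rcases Nat.eq_zero_or_pos n with hn0 | hnpos
        · have hzz : (n : Int) = 0 := by omega
          have hcell0 : pvCellB park i 0 = true := hzz ▸ hcell
          have hv1 : v = 1 := by rw [hv]; simp [hzz, hcell0]
          rw [hv1, hzz]
          exact pvDp_first park i hi hcell0
        · have hne : ((n : Int) == 0) = false := beq_eq_false_iff_ne.mpr (by omega)
          have hv2 : v = min (min (PySem.List.pyGetD prev (n : Int) 0)
              (PySem.List.pyGetD p.2 ((n : Int) - 1) 0))
              (PySem.List.pyGetD prev ((n : Int) - 1) 0) + 1 := by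
            rw [hv]; simp [hcell, hne]
          rw [hv2]
          have hb := ihdp (n - 1) (by omega)
          have hbcast : ((n - 1 : Nat) : Int) = (n : Int) - 1 := by omega
          rw [hbcast] at hb
          exact pvDp_step park i (n : Int) _ _ _ hi (by omega) hcell
            (hprev (n : Int) (by positivity) (by omega)) hb
            (hprev ((n : Int) - 1) (by omega) (by omega))
      · rw [hv, if_neg hcell]
        exact pvDp_blocked park i (n : Int) hi (by positivity)
          (by revert hcell; cases pvCellB park i (n : Int) <;> simp)
    -- indexing the extended row
    have hlen2 : p.2.length = n := ihlen
    have hget_lt : ∀ j : Nat, j < n →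
        PySem.List.pyGetD (p.2 ++ [v]) (j : Int) 0 = PySem.List.pyGetD p.2 (j : Int) 0 := by
      intro j hj
      rw [PySem.List.pyGetD_natCast, PySem.List.pyGetD_natCast]
      rw [List.getD_eq_getElem?_getD, List.getD_eq_getElem?_getD,
        List.getElem?_append_left (by omega)]
    have hget_last : PySem.List.pyGetD (p.2 ++ [v]) ((n : Nat) : Int) 0 = v := by
      rw [PySem.List.pyGetD_natCast, List.getD_eq_getElem?_getD,
        List.getElem?_append_right (by omega)]
      simp [hlen2]
    refine ⟨by simp [hlen2], ?_, ?_, ?_, ?_⟩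
    · -- DP values
      intro j hj
      rcases Nat.lt_succ_iff_lt_or_eq.1 hj with hj' | hj'
      · rw [hget_lt j hj']; exact ihdp j hj'
      · subst hj'; rw [hget_last]; exact hvdp
    · -- s0 ≤ new side
      dsimp only
      split <;> omega
    · -- upper bound
      intro j hj
      rcases Nat.lt_succ_iff_lt_or_eq.1 hj with hj' | hj'
      · rw [hget_lt j hj']
        have := ihub j hj'
        dsimp only
        split <;> omega
      · subst hj'; rw [hget_last]
        dsimp only
        split <;> omega
    · -- witness
      dsimp only
      by_cases hc : p.1 < v
      · rw [if_pos hc]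
        exact Or.inr ⟨n, by omega, (hget_last).symm⟩
      · rw [if_neg hc]
        rcases ihwit with hw | ⟨j, hj, hw⟩
        · exact Or.inl hw
        · exact Or.inr ⟨j, by omega, by rw [hget_lt j hj]; exact hw⟩

-- the global invariant carried across rows
def pvGS (park : List (List String)) (W r s : Int) : Prop :=
  0 ≤ s ∧
  (∀ i j k : Int, 0 ≤ i → i < r → 0 ≤ j → j < W → k ≤ i + 1 → k ≤ j + 1 → pvSq park i j k → k ≤ s) ∧
  (0 < s → ∃ i j : Int, 0 ≤ i ∧ i < r ∧ 0 ≤ j ∧ j < W ∧ s ≤ i + 1 ∧ s ≤ j + 1 ∧ pvSq park i j s)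

theorem pvOuter_spec (park : List (List String)) (W : Int) (hW : 0 ≤ W) : ∀ r : Nat,
    (∀ j : Int, 0 ≤ j → j < W →
      pvDpOK park ((r : Int) - 1) j
        (PySem.List.pyGetD ((PySem.List.pyRange 0 (r : Int) 1).foldl (pvRowB park W) (0, List.replicate W.toNat 0)).2 j 0)) ∧
    pvGS park W (r : Int) ((PySem.List.pyRange 0 (r : Int) 1).foldl (pvRowB park W) (0, List.replicate W.toNat 0)).1 := by
  intro r
  induction r with
  | zero =>
    rw [Nat.cast_zero, PySem.List.pyRange_one_eq_nil (le_refl 0)]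
    simp only [List.foldl_nil]
    constructor
    · intro j hj0 hjW
      have hz : PySem.List.pyGetD (List.replicate W.toNat (0:Int)) j 0 = 0 := by
        by_cases hr : PySem.Raise.InRange (List.replicate W.toNat (0:Int)).length j
        · exact List.eq_of_mem_replicate (PySem.List.pyGetD_mem _ _ hr)
        · exact PySem.List.pyGetD_of_none _ _ _ ((PySem.List.pyGet?_eq_none_iff _ _).2 hr)
      have e1 : (0:Int) - 1 = -1 := by norm_num
      rw [e1, hz]
      exact pvDpOK_base park j (by omega)
    · refine ⟨le_rfl, ?_, ?_⟩
      · intro i j k h1 h2 h3 h4 h5 h6 h7; omega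
      · intro h; exact absurd h (by omega)
  | succ r ih =>
    obtain ⟨ihdp, ihgs⟩ := ih
    obtain ⟨ihs_nonneg, ihub, ihwit⟩ := ihgs
    have hcast : ((r + 1 : Nat) : Int) = (r : Int) + 1 := by push_cast; ring
    rw [hcast, PySem.List.pyRange_one_succ_right (by positivity), List.foldl_append,
      List.foldl_cons, List.foldl_nil]
    set p := (PySem.List.pyRange 0 (r : Int) 1).foldl (pvRowB park W) (0, List.replicate W.toNat 0) with hp
    simp only [pvRowB]
    have hWt : ((W.toNat : Nat) : Int) = W := Int.toNat_of_nonneg hW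
    have hin := pvRowB_inner_spec park W (r : Int) p.1 p.2 (by positivity) ihdp W.toNat (by omega)
    rw [hWt] at hin
    obtain ⟨hlen, hdp, hs0, hub, hwit⟩ := hin
    have e1 : (r : Int) + 1 - 1 = (r : Int) := by ring
    constructor
    · intro j hj0 hjW
      rw [e1]
      have hj' := hdp j.toNat (by omega)
      rw [Int.toNat_of_nonneg hj0] at hj'
      exact hj'
    · refine ⟨le_trans ihs_nonneg hs0, ?_, ?_⟩
      · intro i j k hi0 hir hj0 hjW hk1 hk2 hsq
        by_cases hir' : i < (r : Int)
        · exact le_trans (ihub i j k hi0 hir' hj0 hjW hk1 hk2 hsq) hs0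
        · have hieq : i = (r : Int) := by omega
          subst hieq
          have hdpj := hdp j.toNat (by omega)
          rw [Int.toNat_of_nonneg hj0] at hdpj
          obtain ⟨-, -, -, -, hmax⟩ := hdpj
          have hubj := hub j.toNat (by omega)
          rw [Int.toNat_of_nonneg hj0] at hubj
          exact le_trans (hmax k hk1 hk2 hsq) hubj
      · intro hpos
        rcases hwit with hw | ⟨j, hjn, hw⟩
        · rw [hw] at hpos ⊢
          obtain ⟨i, j, c1, c2, c3, c4, c5, c6, c7⟩ := ihwit hpos
          exact ⟨i, j, c1, by omega, c3, c4, c5, c6, c7⟩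
        · rw [hw]
          have hdpj := hdp j hjn
          obtain ⟨-, hvi, hvj, hvS, -⟩ := hdpj
          exact ⟨(r : Int), (j : Int), by positivity, by omega, by positivity, by omega,
            hvi, hvj, hvS⟩

-- the master characterisation: A's per-mat search succeeds exactly on mats up to the DP side
theorem pvAnyPlace_iff_le_side (park : List (List String)) (H W : Int)
    (hH : 0 ≤ H) (hW : 0 ≤ W) (mat : Int) :
    pvAnyPlace park H W mat = true ↔
      mat ≤ ((PySem.List.pyRange 0 H 1).foldl (pvRowB park W) (0, List.replicate W.toNat 0)).1 := by
  have hHt : ((H.toNat : Nat) : Int) = H := Int.toNat_of_nonneg hH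
  have hspec := pvOuter_spec park W hW H.toNat
  rw [hHt] at hspec
  obtain ⟨hs0, hub, hwit⟩ := hspec.2
  by_cases hm : mat ≤ 0
  · exact iff_of_true ((pvAnyPlace_iff park H W mat).2 (pvFitsProp_nonpos park H W mat hH hW hm))
      (le_trans hm hs0)
  · rw [pvAnyPlace_iff]
    constructor
    · rintro ⟨a, b, ha0, hb0, haH, hbW, hall⟩
      refine hub (a + mat - 1) (b + mat - 1) mat (by omega) (by omega) (by omega) (by omega)
        (by omega) (by omega) ?_
      intro x y hx1 hx2 hy1 hy2
      exact hall x y (by omega) (by omega) (by omega) (by omega)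
    · intro hle
      obtain ⟨i, j, hi0, hiH, hj0, hjW, hsi, hsj, hsq⟩ := hwit (by omega)
      refine ⟨i - mat + 1, j - mat + 1, by omega, by omega, by omega, by omega, ?_⟩
      intro x y hx1 hx2 hy1 hy2
      exact pvSq_mono park i j _ mat hle hsq x y (by omega) (by omega) (by omega) (by omega)

theorem pvFoldlMax_of_le (t : List Int) (x : Int) (h : ∀ y ∈ t, y ≤ x) :
    t.foldl max x = x := by
  induction t generalizing x with
  | nil => rfl
  | cons y ys ih =>
    simp only [List.foldl_cons]
    rw [max_eq_left (h y (List.mem_cons_self))]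
    exact ih x fun z hz => h z (List.mem_cons_of_mem y hz)

-- A's first-fit over a descending list is the max of the elements it would accept
theorem pvLoopA_eq_max (park : List (List String)) (H W s : Int)
    (hiff : ∀ mat : Int, pvAnyPlace park H W mat = true ↔ mat ≤ s)
    (l : List Int) (hsorted : l.Pairwise (fun a b => b ≤ a)) :
    pvLoopA park H W l = (PySem.List.max? (l.filter (fun m => decide (m ≤ s))) (fun x => x)).getD (-1) := by
  induction l with
  | nil => simp [pvLoopA, PySem.List.max?]
  | cons m rest ih =>
    obtain ⟨hhead, htail⟩ := List.pairwise_cons.1 hsorted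
    simp only [pvLoopA]
    by_cases hfit : pvAnyPlace park H W m = true
    · rw [if_pos hfit]
      have hms : m ≤ s := (hiff m).1 hfit
      have hall : ∀ y ∈ rest.filter (fun m' => decide (m' ≤ s)), y ≤ m :=
        fun y hy => hhead y (List.mem_of_mem_filter hy)
      rw [List.filter_cons_of_pos (by simpa using hms), PySem.List.max?_id_cons,
          pvFoldlMax_of_le _ _ hall, Option.getD_some]
    · rw [if_neg hfit]
      have hms : ¬ m ≤ s := fun hc => hfit ((hiff m).2 hc)
      rw [List.filter_cons_of_neg (by simpa using hms)]
      exact ih htail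

theorem pvMax_perm (xs ys : List Int) (h : xs.Perm ys) :
    PySem.List.max? xs (fun x => x) = none ∧ PySem.List.max? ys (fun x => x) = none ∨
    ∃ a b, PySem.List.max? xs (fun x => x) = some a ∧ PySem.List.max? ys (fun x => x) = some b ∧ a = b := by
  cases hx : PySem.List.max? xs (fun x => x) with
  | none =>
    left
    rw [PySem.List.max?_eq_none_iff] at hx
    subst hx
    rw [PySem.List.max?_eq_none_iff]
    exact ⟨rfl, h.symm.eq_nil⟩
  | some a =>
    cases hy : PySem.List.max? ys (fun x => x) with
    | none =>
      exfalso
      rw [PySem.List.max?_eq_none_iff] at hy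
      subst hy
      rw [h.eq_nil] at hx
      simp [PySem.List.max?] at hx
    | some b =>
      right
      refine ⟨a, b, rfl, rfl, le_antisymm ?_ ?_⟩
      · exact PySem.List.max?_isMax hy a (h.subset (PySem.List.max?_mem hx))
      · exact PySem.List.max?_isMax hx b (h.symm.subset (PySem.List.max?_mem hy))

-- ===== VERDICT (by name: the statement is the Claim_ definition above) =====
theorem solution_spec : Claim_equal_solution := by
  intro mats park hdom hpre
  unfold Spec_solution solution solution_alt
  simp only []
  have hH0 : (0:Int) ≤ (park.length : Int) := Int.natCast_nonneg _
  have hW0 : (0:Int) ≤ (((PySem.List.pyGet? park 0).getD []).length : Int) := Int.natCast_nonneg _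
  have hsorted : (PySem.List.sorted mats (fun x => x) true).Pairwise (fun a b => b ≤ a) := by
    simpa using PySem.List.sorted_pairwise_rev mats (fun x => x)
  rw [pvLoopA_eq_max park _ _ _
    (pvAnyPlace_iff_le_side park _ _ hH0 hW0) _ hsorted]
  have hperm := (PySem.List.sorted_perm mats (fun x => x) true).filter
    (fun m => decide (m ≤ ((PySem.List.pyRange 0 (park.length : Int) 1).foldl
      (pvRowB park (((PySem.List.pyGet? park 0).getD []).length : Int))
      (0, List.replicate (((PySem.List.pyGet? park 0).getD []).length : Int).toNat 0)).1))
  rcases pvMax_perm _ _ hperm with ⟨h1, h2⟩ | ⟨a, b, h1, h2, hab⟩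
  · rw [h1, h2]
  · rw [h1, h2, hab]
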